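-- pv_equiv track=rewrite | github.com/vijay2930/HackerrankAndLeetcode | com/geeksforgeeks/CountDigits.py | evenlyDivides
-- ===== SOURCE A (Python) =====
-- def evenlyDivides(N):
--     count = 0
--     num = N
--     while N:
--         val = N % 10
--         if val and num % val == 0:
--             count += 1
--         N //= 10
--
--     return count
-- ===== SOURCE B (Python) =====
-- def evenlyDivides(N):
--     return sum(1 for c in str(N) if c != '0' and N % int(c) == 0)
-- ===== Notes on version B (the rewrite author's own statement) =====
-- stated objective: idiomatic
-- what changed: B iterates over the decimal string str(N) with a sum-generator instead of A's arithmetic digit-extraction loop (N % 10 / N //= 10) with a mutable counter.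
import Mathlib
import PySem

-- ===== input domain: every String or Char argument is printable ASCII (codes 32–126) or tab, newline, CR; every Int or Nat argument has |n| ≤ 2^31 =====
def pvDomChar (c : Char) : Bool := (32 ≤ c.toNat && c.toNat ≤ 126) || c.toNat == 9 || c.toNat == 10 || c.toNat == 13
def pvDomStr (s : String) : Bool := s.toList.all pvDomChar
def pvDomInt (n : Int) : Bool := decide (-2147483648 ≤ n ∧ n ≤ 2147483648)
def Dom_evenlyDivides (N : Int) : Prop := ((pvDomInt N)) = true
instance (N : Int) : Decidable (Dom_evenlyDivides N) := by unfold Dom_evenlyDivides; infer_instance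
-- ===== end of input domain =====

-- B replaces A's arithmetic digit-extraction loop by an idiomatic sum over the decimal string;
-- equal return values are proved for all N ≥ 0 (A's while-loop never terminates for N < 0).

-- ===== PORT A =====
-- 'while N: val = N % 10; if val and num % val == 0: count += 1; N //= 10'
-- The guard 'N ≤ 0' totalizes the recursion: Python's loop diverges for N < 0 (excluded by Pre_).
def evenlyDividesLoop (num N count : Int) : Int :=
  if _h : N ≤ 0 then count
  else
    let val := PySem.Int.mod N 10
    let count' := if val ≠ 0 ∧ PySem.Int.mod num val = 0 then count + 1 else count
    evenlyDividesLoop num (PySem.Int.floordiv N 10) count'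
termination_by N.toNat
decreasing_by
  simp only [PySem.Int.floordiv_eq_ediv_of_pos (by norm_num : (0:Int) < 10)]
  omega

def evenlyDivides (N : Int) : Int := evenlyDividesLoop N N 0

-- ===== PORT B =====
-- int(c) for a one-character string; exact where Source B evaluates it (decimal digit characters)
def pyIntOfChar (c : Char) : Int := (PySem.Int.ofStr? (String.ofList [c])).getD 0

-- 'sum(1 for c in str(N) if c != '0' and N % int(c) == 0)'
def evenlyDivides_alt (N : Int) : Int :=
  (PySem.Int.toStr N).toList.foldl
    (fun cnt c => if c ≠ '0' ∧ PySem.Int.mod N (pyIntOfChar c) = 0 then cnt + 1 else cnt) 0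

-- ===== PRECONDITION & SPEC =====
-- Pre_ excludes N < 0, on which A's 'while N: … N //= 10' loops forever (N //= 10 stabilises at -1).
def Pre_evenlyDivides (N : Int) : Prop := 0 ≤ N
instance (N : Int) : Decidable (Pre_evenlyDivides N) := by unfold Pre_evenlyDivides; infer_instance
def pvWitness_evenlyDivides : Int := 12

def Spec_evenlyDivides (N : Int) (out : Int) : Prop := out = evenlyDivides_alt N
instance (N : Int) (out : Int) : Decidable (Spec_evenlyDivides N out) := by unfold Spec_evenlyDivides; infer_instance

-- ===== CLAIM (what is proved, stated in full; the proofs are below) =====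
def Claim_equal_evenlyDivides : Prop := ∀ (N : Int), Dom_evenlyDivides N → Pre_evenlyDivides N → Spec_evenlyDivides N (evenlyDivides N)

-- ===== LEMMAS AND PROOFS =====

-- the digit predicate both programs test, over a natural-number digit
def pvP (num : Int) (d : Nat) : Bool := decide ((d : Int) ≠ 0 ∧ PySem.Int.mod num (d : Int) = 0)

-- A's loop counts the base-10 digits of m satisfying pvP
lemma loop_eq_countP (num : Int) :
    ∀ (m : Nat) (count : Int),
      evenlyDividesLoop num (m : Int) count
        = count + ((Nat.digits 10 m).countP (pvP num) : Int) := by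
  intro m
  induction m using Nat.strong_induction_on with
  | _ m ih =>
    intro count
    rw [evenlyDividesLoop]
    by_cases hm : m = 0
    · subst hm; simp
    · have hm0 : 0 < m := Nat.pos_of_ne_zero hm
      have hneg : ¬ ((m : Int) ≤ 0) := by exact_mod_cast not_le.2 (by exact_mod_cast hm0)
      rw [dif_neg hneg]
      have hmod : PySem.Int.mod (m : Int) 10 = ((m % 10 : Nat) : Int) := by
        exact_mod_cast PySem.Int.mod_natCast m 10
      have hdiv : PySem.Int.floordiv (m : Int) 10 = ((m / 10 : Nat) : Int) := by
        exact_mod_cast PySem.Int.floordiv_natCast m 10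
      simp only [hmod, hdiv]
      rw [ih (m / 10) (Nat.div_lt_self hm0 (by norm_num)) _]
      rw [Nat.digits_def' (by norm_num : 1 < 10) hm0, List.countP_cons]
      by_cases hp : ((m % 10 : Nat) : Int) ≠ 0 ∧ PySem.Int.mod num ((m % 10 : Nat) : Int) = 0
      · rw [if_pos hp]
        have hb : pvP num (m % 10) = true := by unfold pvP; exact decide_eq_true hp
        rw [hb]
        simp only [if_true]
        push_cast
        ring
      · rw [if_neg hp]
        have hb : pvP num (m % 10) = false := by
          unfold pvP; exact decide_eq_false hp
        rw [hb]
        push_cast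
        ring

-- Nat.toDigitsCore with enough fuel produces the reversed digit characters
lemma toDigitsCore_eq (f : Nat) :
    ∀ (n : Nat) (acc : List Char), 0 < n → n ≤ f →
      Nat.toDigitsCore 10 f n acc
        = ((Nat.digits 10 n).map Nat.digitChar).reverse ++ acc := by
  induction f with
  | zero => intro n acc hn hf; omega
  | succ f ih =>
    intro n acc hn hf
    rw [Nat.toDigitsCore]
    by_cases h : n / 10 = 0
    · have hlt : n < 10 := by omega
      rw [if_pos h, Nat.digits_def' (by norm_num : 1 < 10) hn, h]
      simp [Nat.mod_eq_of_lt hlt]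
    · rw [if_neg h]
      have hrec := ih (n / 10) (Nat.digitChar (n % 10) :: acc)
        (Nat.pos_of_ne_zero h) (by omega)
      rw [hrec, Nat.digits_def' (by norm_num : 1 < 10) hn]
      simp

-- int(c) recovers a digit from its character
lemma pyIntOfChar_digitChar (d : Nat) (hd : d < 10) :
    pyIntOfChar (Nat.digitChar d) = (d : Int) := by
  interval_cases d <;> decide

lemma digitChar_ne_zero_iff (d : Nat) (hd : d < 10) :
    (Nat.digitChar d ≠ '0') ↔ ((d : Int) ≠ 0) := by
  interval_cases d <;> decide

-- B's fold is a countP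
lemma fold_eq_countP (N : Int) :
    ∀ (l : List Char) (cnt : Int),
      l.foldl (fun cnt c =>
          if c ≠ '0' ∧ PySem.Int.mod N (pyIntOfChar c) = 0 then cnt + 1 else cnt) cnt
        = cnt + (l.countP
            (fun c => decide (c ≠ '0' ∧ PySem.Int.mod N (pyIntOfChar c) = 0)) : Int) := by
  intro l
  induction l with
  | nil => intro cnt; simp
  | cons c t ih =>
    intro cnt
    rw [List.foldl_cons, ih, List.countP_cons]
    by_cases h : c ≠ '0' ∧ PySem.Int.mod N (pyIntOfChar c) = 0
    · rw [if_pos h, decide_eq_true h]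
      simp only [if_true]
      push_cast; ring
    · rw [if_neg h, decide_eq_false h]
      push_cast; ring

-- ===== VERDICT (by name: the statement is the Claim_ definition above) =====
theorem evenlyDivides_spec : Claim_equal_evenlyDivides := by
  intro N _hDom hPre
  unfold Spec_evenlyDivides
  have hN : (N.toNat : Int) = N := Int.toNat_of_nonneg hPre
  by_cases h0 : N = 0
  · subst h0
    have hA0 : evenlyDivides 0 = 0 := by
      rw [evenlyDivides, evenlyDividesLoop]; simp
    rw [hA0]; decide
  · set m : Nat := N.toNat with hm
    have hm0 : 0 < m := by omega
    -- A's side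
    have hA : evenlyDivides N = ((Nat.digits 10 m).countP (pvP N) : Int) := by
      unfold evenlyDivides
      rw [← hN, loop_eq_countP]
      simp
    -- B's side
    have hchars : (PySem.Int.toStr N).toList
        = ((Nat.digits 10 m).map Nat.digitChar).reverse := by
      rw [PySem.Int.toList_toStr]
      unfold PySem.Int.toChars
      rw [if_neg (by omega : ¬ N < 0)]
      unfold Nat.toDigits
      rw [toDigitsCore_eq (m + 1) m [] hm0 (by omega)]
      simp
    have hcongr :
        (Nat.digits 10 m).countP
            ((fun c => decide (c ≠ '0' ∧ PySem.Int.mod N (pyIntOfChar c) = 0)) ∘ Nat.digitChar)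
          = (Nat.digits 10 m).countP (pvP N) := by
      apply List.countP_congr
      intro d hdmem
      have hd : d < 10 := Nat.digits_lt_base (by norm_num) hdmem
      simp only [Function.comp_apply, pvP, decide_eq_true_eq,
        pyIntOfChar_digitChar d hd]
      exact and_congr_left' (digitChar_ne_zero_iff d hd)
    have hB : evenlyDivides_alt N
        = ((Nat.digits 10 m).countP (pvP N) : Int) := by
      unfold evenlyDivides_alt
      rw [hchars, fold_eq_countP, List.countP_reverse, List.countP_map, hcongr]
      simp
    rw [hA, hB]
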